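-- pv_equiv track=rewrite | github.com/brajesh2020/ProjectEuler-1 | 308.py | get_largest_proper_divisor_list
-- ===== SOURCE A (Python) =====
-- import math
--
-- def get_largest_proper_divisor_list(n):
--     output = [i for i in range(n + 1)]
--     sqrt_n = int(math.sqrt(n)) + 1
--     for i in range(2, sqrt_n + 1):
--         if output[i] == i:
--             for j in range(i, n + 1, i):
--                 if output[j] == j:
--                     output[j] = j // i
--     for i in range(2, n + 1):
--         if output[i] == i:
--             output[i] = 1
--     return output
-- ===== SOURCE B (Python) =====
-- def get_largest_proper_divisor_list(n):
--     output = []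
--     for i in range(n + 1):
--         if i < 2:
--             output.append(i)
--             continue
--         d = 2
--         while d * d <= i:
--             if i % d == 0:
--                 break
--             d += 1
--         output.append(i // d if d * d <= i else 1)
--     return output
-- ===== Notes on version B (the rewrite author's own statement) =====
-- stated objective: alternative
-- what changed: replaces the shared in-place smallest-prime-factor sieve (nested marking loops over one mutable table) with an independent per-number trial-division scan
-- outside the precondition, e.g. on get_largest_proper_divisor_list(1): A raises IndexError, B returns [0, 1]; on get_largest_proper_divisor_list(-3): A raises ValueError, B returns []
import Mathlib
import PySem

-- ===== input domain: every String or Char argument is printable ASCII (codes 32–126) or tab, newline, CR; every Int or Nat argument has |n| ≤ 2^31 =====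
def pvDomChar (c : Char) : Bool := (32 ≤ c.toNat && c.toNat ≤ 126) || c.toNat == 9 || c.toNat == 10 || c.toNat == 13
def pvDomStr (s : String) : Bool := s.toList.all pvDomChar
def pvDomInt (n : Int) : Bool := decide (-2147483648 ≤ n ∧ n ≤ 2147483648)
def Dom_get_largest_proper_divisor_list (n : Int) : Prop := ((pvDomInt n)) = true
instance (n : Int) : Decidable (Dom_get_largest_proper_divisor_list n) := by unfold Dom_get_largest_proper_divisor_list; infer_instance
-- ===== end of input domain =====

-- B replaces A's shared in-place smallest-prime-factor sieve by an independent
-- per-number trial-division scan (objective: alternative algorithm, not faster).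

-- ===== PORT A =====
-- range(a, b) over Nat indices
def pvNatRange (a b : Nat) : List Nat := List.range' a (b - a)
-- range(i, b, i): the multiples i, 2i, … below b (step = start = i)
def pvStepRange (i b : Nat) : List Nat := List.range' i ((b - i + (i - 1)) / i) i
-- the body "if output[j] == j: output[j] = w(j)" shared by A's two marking loops
def pvMark (w : Nat → Int) (o : List Int) (j : Nat) : List Int :=
  if o.getD j 0 = (j : Int) then o.set j (w j) else o

def get_largest_proper_divisor_list (n : Int) : List Int :=
  -- output = [i for i in range(n + 1)]
  let len := (n + 1).toNat
  let output := (List.range len).map (fun (i : Nat) => (i : Int))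
  -- sqrt_n = int(math.sqrt(n)) + 1 ; int(math.sqrt(n)) = Nat.sqrt for the admitted
  -- inputs 0 ≤ n ≤ 2^31 (float sqrt is exact there); for n < 0 Python raises
  -- ValueError, which Pre_ excludes.
  let sqrt_n := Nat.sqrt n.toNat + 1
  -- for i in range(2, sqrt_n + 1): if output[i] == i: for j in range(i, n+1, i): …
  -- (j // i on nonnegative operands = Nat division)
  let out1 := (pvNatRange 2 (sqrt_n + 1)).foldl
    (fun (out : List Int) (i : Nat) =>
      if out.getD i 0 = (i : Int) then
        (pvStepRange i len).foldl (pvMark (fun j => ((j / i : Nat) : Int))) out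
      else out) output
  -- for i in range(2, n + 1): if output[i] == i: output[i] = 1
  (pvNatRange 2 len).foldl (pvMark (fun _ => 1)) out1

-- ===== PORT B =====
-- the while-loop "d = 2; while d*d <= i: if i % d == 0: break; d += 1":
-- returns the first divisor found, none if the loop runs off the end
def pvSmallestDiv (i d : Nat) : Option Nat :=
  if h : d * d ≤ i then
    if i % d = 0 then some d else pvSmallestDiv i (d + 1)
  else none
termination_by i + 1 - d
decreasing_by
  have hdi : d ≤ i := by nlinarith
  omega

def get_largest_proper_divisor_list_alt (n : Int) : List Int :=
  (List.range (n + 1).toNat).map (fun (i : Nat) =>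
    if i < 2 then (i : Int)
    else
      match pvSmallestDiv i 2 with
      | some d => ((i / d : Nat) : Int)
      | none => 1)

-- ===== PRECONDITION & SPEC =====
-- Pre_ excludes exactly the inputs on which A raises: n < 0 (math.sqrt raises
-- ValueError) and n = 1 (output[2] raises IndexError on the 2-element list).
def Pre_get_largest_proper_divisor_list (n : Int) : Prop := 0 ≤ n ∧ n ≠ 1
instance (n : Int) : Decidable (Pre_get_largest_proper_divisor_list n) := by
  unfold Pre_get_largest_proper_divisor_list; infer_instance
def pvWitness_get_largest_proper_divisor_list : Int := 6

def Spec_get_largest_proper_divisor_list (n : Int) (out : List Int) : Prop :=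
  out = get_largest_proper_divisor_list_alt n
instance (n : Int) (out : List Int) : Decidable (Spec_get_largest_proper_divisor_list n out) := by
  unfold Spec_get_largest_proper_divisor_list; infer_instance

-- ===== CLAIM (what is proved, stated in full; the proofs are below) =====
def Claim_equal_get_largest_proper_divisor_list : Prop :=
  ∀ (n : Int), Dom_get_largest_proper_divisor_list n →
    Pre_get_largest_proper_divisor_list n →
    Spec_get_largest_proper_divisor_list n (get_largest_proper_divisor_list n)

-- ===== LEMMAS AND PROOFS =====

-- the common value: v j = j for j < 2, else j / (smallest prime factor of j)
def pvV (j : Nat) : Int := if j < 2 then (j : Int) else ((j / j.minFac : Nat) : Int)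
-- A's intermediate state after processing sieve indices up to m
def pvF (m j : Nat) : Int :=
  if j < 2 then (j : Int) else if j.minFac ≤ m then ((j / j.minFac : Nat) : Int) else (j : Int)

lemma pv_getD_map_range (g : Nat → Int) (m q : Nat) :
    (((List.range m).map g).getD q 0) = if q < m then g q else 0 := by
  simp [List.getD_eq_getElem?_getD, List.getElem?_map]
  split_ifs with h
  · simp [h]
  · simp [h]

lemma pv_foldl_mark_length (w : Nat → Int) :
    ∀ (L : List Nat) (out : List Int), (L.foldl (pvMark w) out).length = out.length := by
  intro L
  induction L with
  | nil => intro out; rfl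
  | cons j t ih =>
    intro out
    simp only [List.foldl_cons]
    rw [ih]
    unfold pvMark
    split_ifs <;> simp

lemma pv_foldl_mark_getD (w : Nat → Int) :
    ∀ (L : List Nat) (out : List Int) (q : Nat),
      (∀ j ∈ L, j ≠ 0 ∧ w j ≠ (j : Int)) →
      (L.foldl (pvMark w) out).getD q 0 =
        if q ∈ L ∧ q < out.length ∧ out.getD q 0 = (q : Int) then w q else out.getD q 0 := by
  intro L
  induction L with
  | nil => intro out q _; simp
  | cons j t ih =>
    intro out q h
    have hj := h j (by simp)
    have ht : ∀ x ∈ t, x ≠ 0 ∧ w x ≠ (x : Int) := fun x hx => h x (by simp [hx])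
    simp only [List.foldl_cons]
    rw [ih _ _ ht]
    have hlen : (pvMark w out j).length = out.length := by
      unfold pvMark; split_ifs <;> simp
    by_cases hq : q = j
    · subst hq
      by_cases hc : out.getD q 0 = (q : Int)
      · by_cases hql : q < out.length
        · have hset : (pvMark w out q).getD q 0 = w q := by
            unfold pvMark
            rw [if_pos hc]
            simp [List.getD_eq_getElem?_getD, hql]
          rw [hlen, hset,
            if_pos (show q ∈ q :: t ∧ q < out.length ∧ out.getD q 0 = (q : Int) from
              ⟨by simp, hql, hc⟩)]
          split_ifs <;> rfl
        · -- q out of range: getD reads the default 0, contradicting out.getD q 0 = q ≠ 0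
          exfalso
          have h0 : out.getD q 0 = 0 := by
            simp [List.getD_eq_getElem?_getD, List.getElem?_eq_none (by omega : out.length ≤ q)]
          rw [h0] at hc
          exact hj.1 (by exact_mod_cast hc.symm)
      · have hno : pvMark w out q = out := by unfold pvMark; rw [if_neg hc]
        rw [hno, if_neg (fun h => hc h.2.2), if_neg (fun h => hc h.2.2)]
    · have hgd : (pvMark w out j).getD q 0 = out.getD q 0 := by
        unfold pvMark
        split_ifs with _
        · simp [List.getD_eq_getElem?_getD, Ne.symm hq]
        · rfl
      rw [hlen, hgd]
      by_cases h2 : q ∈ t ∧ q < out.length ∧ out.getD q 0 = (q : Int)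
      · rw [if_pos h2, if_pos ⟨by simp [h2.1], h2.2.1, h2.2.2⟩]
      · have hnc : ¬ (q ∈ j :: t ∧ q < out.length ∧ out.getD q 0 = (q : Int)) := by
          rintro ⟨hm, h4, h5⟩
          rcases List.mem_cons.mp hm with h3 | h3
          · exact hq h3
          · exact h2 ⟨h3, h4, h5⟩
        rw [if_neg h2, if_neg hnc]

lemma pv_mem_stepRange (i b q : Nat) (hi : 2 ≤ i) (hib : i ≤ b - 1) (hb : 1 ≤ b) :
    q ∈ pvStepRange i b ↔ i ∣ q ∧ i ≤ q ∧ q ≤ b - 1 := by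
  unfold pvStepRange
  have hlen : (b - i + (i - 1)) / i = (b - 1) / i := by
    congr 1; omega
  rw [hlen, List.mem_range']
  constructor
  · rintro ⟨t, ht, rfl⟩
    refine ⟨⟨1 + t, by ring⟩, by omega, ?_⟩
    have : t + 1 ≤ (b - 1) / i := ht
    have := (Nat.le_div_iff_mul_le (by omega : 0 < i)).mp this
    nlinarith
  · rintro ⟨⟨c, rfl⟩, hle, hub⟩
    have hc1 : 1 ≤ c := by nlinarith
    refine ⟨c - 1, ?_, by
      cases c with
      | zero => omega
      | succ c => rw [Nat.add_sub_cancel, Nat.mul_succ]; exact Nat.add_comm _ _⟩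
    have : c ≤ (b - 1) / i := (Nat.le_div_iff_mul_le (by omega : 0 < i)).mpr (by nlinarith)
    omega

lemma pv_minFac_lt_of_comp {i : Nat} (h2 : 2 ≤ i) (hnp : ¬ Nat.Prime i) : i.minFac < i := by
  have hp := Nat.minFac_prime (by omega : i ≠ 1)
  rcases lt_or_eq_of_le (Nat.minFac_le (by omega : 0 < i)) with h | h
  · exact h
  · exact absurd (h ▸ hp) hnp

lemma pv_div_minFac_ne {q : Nat} (h2 : 2 ≤ q) : ((q / q.minFac : Nat) : Int) ≠ (q : Int) := by
  have hp := Nat.minFac_prime (by omega : q ≠ 1)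
  have hlt : q / q.minFac < q := Nat.div_lt_self (by omega) hp.one_lt
  intro h
  have : q / q.minFac = q := by exact_mod_cast h
  omega

-- A's sieve step for one index i (2 ≤ i ≤ N) maps the state for i-1 to the state for i
lemma pv_list_eq_of_getD (l1 l2 : List Int) (hlen : l1.length = l2.length)
    (h : ∀ q, l1.getD q 0 = l2.getD q 0) : l1 = l2 := by
  apply List.ext_getElem hlen
  intro q h1 h2
  have hq := h q
  rwa [List.getD_eq_getElem _ _ h1, List.getD_eq_getElem _ _ h2] at hq

lemma pv_cast_ne_of_lt {a b : Nat} (h : a < b) : ((a : Nat) : Int) ≠ ((b : Nat) : Int) := by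
  intro he
  have : a = b := by exact_mod_cast he
  omega

-- pvF (i-1) j = j exactly when j < 2 or minFac j > i - 1
lemma pv_F_eq_self_iff {m j : Nat} (h2 : 2 ≤ j) : pvF m j = (j : Int) ↔ ¬ j.minFac ≤ m := by
  unfold pvF
  rw [if_neg (by omega)]
  constructor
  · intro h hle
    rw [if_pos hle] at h
    exact pv_div_minFac_ne h2 h
  · intro h
    rw [if_neg h]

-- A's sieve step for one index i (2 ≤ i ≤ N) maps the state for i-1 to the state for i
lemma pv_outer_step (N i : Nat) (h2 : 2 ≤ i) (hN : i ≤ N) :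
    (if ((List.range (N + 1)).map (pvF (i - 1))).getD i 0 = (i : Int) then
       (pvStepRange i (N + 1)).foldl (pvMark (fun j => ((j / i : Nat) : Int)))
         ((List.range (N + 1)).map (pvF (i - 1)))
     else ((List.range (N + 1)).map (pvF (i - 1))))
    = (List.range (N + 1)).map (pvF i) := by
  have hmemL : ∀ q, q ∈ pvStepRange i (N + 1) ↔ i ∣ q ∧ i ≤ q ∧ q ≤ N := by
    intro q
    have := pv_mem_stepRange i (N + 1) q h2 (by omega) (by omega)
    simpa using this
  have hgetI : ((List.range (N + 1)).map (pvF (i - 1))).getD i 0 = pvF (i - 1) i := by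
    rw [pv_getD_map_range, if_pos (by omega)]
  by_cases hp : Nat.Prime i
  · -- i is prime: the sieve condition holds and the inner loop marks the multiples of i
    have hFi : pvF (i - 1) i = (i : Int) :=
      (pv_F_eq_self_iff h2).mpr (by rw [hp.minFac_eq]; omega)
    rw [hgetI, if_pos hFi]
    have hw : ∀ j ∈ pvStepRange i (N + 1), j ≠ 0 ∧ ((j / i : Nat) : Int) ≠ (j : Int) := by
      intro j hj
      rcases (hmemL j).mp hj with ⟨_, hij, _⟩
      exact ⟨by omega, pv_cast_ne_of_lt (Nat.div_lt_self (by omega) (by omega)) |>.symm.symm⟩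
    apply pv_list_eq_of_getD
    · rw [pv_foldl_mark_length]; simp
    · intro q
      rw [pv_foldl_mark_getD _ _ _ _ hw, pv_getD_map_range, pv_getD_map_range]
      by_cases hqN : q < N + 1
      · rw [if_pos hqN]
        by_cases hq2 : 2 ≤ q
        · by_cases hcond : q ∈ pvStepRange i (N + 1) ∧
              q < ((List.range (N + 1)).map (pvF (i - 1))).length ∧
              pvF (i - 1) q = (q : Int)
          · rw [if_pos hcond, if_pos hqN]
            rcases (hmemL q).mp hcond.1 with ⟨hdvd, hiq, hqle⟩
            have hself : pvF (i - 1) q = (q : Int) := hcond.2.2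
            have hge : ¬ q.minFac ≤ i - 1 := (pv_F_eq_self_iff hq2).mp hself
            have hle' : q.minFac ≤ i := Nat.minFac_le_of_dvd h2 hdvd
            have hmf : q.minFac = i := by omega
            unfold pvF
            rw [if_neg (by omega), if_pos (by omega), hmf]
          · rw [if_neg hcond, if_pos hqN]
            by_cases hm : q.minFac ≤ i - 1
            · unfold pvF
              rw [if_neg (show ¬ q < 2 by omega), if_neg (show ¬ q < 2 by omega),
                if_pos hm, if_pos (show q.minFac ≤ i by omega)]
            · have hne : q.minFac ≠ i := by
                intro he
                apply hcond
                have hdvd : i ∣ q := he ▸ Nat.minFac_dvd q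
                have hiq : i ≤ q := he ▸ Nat.minFac_le (by omega)
                exact ⟨(hmemL q).mpr ⟨hdvd, hiq, by omega⟩, by simp; omega,
                  (pv_F_eq_self_iff hq2).mpr hm⟩
              unfold pvF
              rw [if_neg (show ¬ q < 2 by omega), if_neg (show ¬ q < 2 by omega),
                if_neg hm, if_neg (show ¬ q.minFac ≤ i by omega)]
        · have hnot : ¬ q ∈ pvStepRange i (N + 1) := by
            intro hmem
            rcases (hmemL q).mp hmem with ⟨_, hiq, _⟩
            omega
          rw [if_neg (fun h => hnot h.1), if_pos hqN]
          unfold pvF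
          rw [if_pos (show q < 2 by omega), if_pos (show q < 2 by omega)]
      · have hnot : ¬ q ∈ pvStepRange i (N + 1) := by
          intro hmem
          rcases (hmemL q).mp hmem with ⟨_, _, hle⟩
          omega
        rw [if_neg (fun h => hnot h.1), if_neg hqN, if_neg hqN]
  · -- i is composite: output[i] ≠ i, nothing happens, and no q has minFac q = i
    have hlt : i.minFac < i := pv_minFac_lt_of_comp h2 hp
    have hFi : pvF (i - 1) i ≠ (i : Int) := by
      intro h
      exact ((pv_F_eq_self_iff h2).mp h) (by omega)
    rw [hgetI, if_neg hFi]
    apply List.map_congr_left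
    intro a _
    by_cases ha : a < 2
    · unfold pvF; rw [if_pos ha, if_pos ha]
    · have hne : a.minFac ≠ i := by
        intro he
        exact hp (he ▸ Nat.minFac_prime (by omega : a ≠ 1))
      unfold pvF
      rw [if_neg ha, if_neg ha]
      by_cases hm : a.minFac ≤ i - 1
      · rw [if_pos hm, if_pos (show a.minFac ≤ i by omega)]
      · rw [if_neg hm, if_neg (show ¬ a.minFac ≤ i by omega)]

lemma pv_outer_fold (N : Nat) (hN : 2 ≤ N) :
    ∀ (c a : Nat), 2 ≤ a → a + c - 1 ≤ N →
      (List.range' a c).foldl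
        (fun (out : List Int) (i : Nat) =>
          if out.getD i 0 = (i : Int) then
            (pvStepRange i (N + 1)).foldl (pvMark (fun j => ((j / i : Nat) : Int))) out
          else out)
        ((List.range (N + 1)).map (pvF (a - 1)))
      = (List.range (N + 1)).map (pvF (a + c - 1)) := by
  intro c
  induction c with
  | zero => intro a _ _; simp
  | succ c ih =>
    intro a ha hub
    rw [List.range'_succ, List.foldl_cons, pv_outer_step N a ha (by omega)]
    have := ih (a + 1) (by omega) (by omega)
    simp only [Nat.add_sub_cancel] at this
    rw [this]
    have h3 : a + 1 + c - 1 = a + (c + 1) - 1 := by omega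
    rw [h3]

lemma pv_A_eq (N : Nat) (hN : 2 ≤ N) :
    get_largest_proper_divisor_list (N : Int) = (List.range (N + 1)).map pvV := by
  unfold get_largest_proper_divisor_list
  have hlen : ((N : Int) + 1).toNat = N + 1 := by omega
  have htn : (N : Int).toNat = N := by omega
  simp only [hlen, htn]
  have hS : N.sqrt + 1 ≤ N := by
    have := Nat.sqrt_lt_self (by omega : 1 < N)
    omega
  -- the initial array [0, 1, …, N] is the sieve state pvF 1
  have hinit : (List.range (N + 1)).map (fun (i : Nat) => (i : Int)) =
      (List.range (N + 1)).map (pvF 1) := by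
    apply List.map_congr_left
    intro a _
    by_cases ha : a < 2
    · unfold pvF; rw [if_pos ha]
    · have : 2 ≤ a.minFac := (Nat.minFac_prime (by omega : a ≠ 1)).two_le
      unfold pvF
      rw [if_neg ha, if_neg (by omega)]
  -- the outer sieve loop over [2 .. sqrt N + 1] yields state pvF (sqrt N + 1)
  have hrange : pvNatRange 2 (N.sqrt + 1 + 1) = List.range' 2 N.sqrt := by
    unfold pvNatRange; rfl
  rw [hinit, hrange]
  have hfold := pv_outer_fold N hN N.sqrt 2 (le_refl 2) (by omega)
  simp only [show (2 : Nat) - 1 = 1 from rfl,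
    show 2 + N.sqrt - 1 = N.sqrt + 1 by omega] at hfold
  rw [hfold]
  -- the final loop turns every untouched index (a prime > sqrt N + 1) into 1
  have hrange2 : pvNatRange 2 (N + 1) = List.range' 2 (N - 1) := by
    unfold pvNatRange; rfl
  rw [hrange2]
  have hw : ∀ j ∈ List.range' 2 (N - 1), j ≠ 0 ∧ (fun (_ : Nat) => (1 : Int)) j ≠ (j : Int) := by
    intro j hj
    rw [List.mem_range'_1] at hj
    refine ⟨by omega, ?_⟩
    simp only
    intro he
    have : j = 1 := by exact_mod_cast he.symm
    omega
  apply pv_list_eq_of_getD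
  · rw [pv_foldl_mark_length]; simp
  · intro q
    rw [pv_foldl_mark_getD _ _ _ _ hw, pv_getD_map_range, pv_getD_map_range]
    by_cases hqN : q < N + 1
    · rw [if_pos hqN, if_pos hqN]
      by_cases hq2 : 2 ≤ q
      · have hmem : q ∈ List.range' 2 (N - 1) := by rw [List.mem_range'_1]; omega
        by_cases hself : pvF (N.sqrt + 1) q = (q : Int)
        · have hgt : ¬ q.minFac ≤ N.sqrt + 1 := (pv_F_eq_self_iff hq2).mp hself
          -- untouched after the sieve ⇒ q is prime ⇒ pvV q = q / q = 1
          have hprime : Nat.Prime q := by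
            by_contra hnp
            have hsq := Nat.minFac_sq_le_self (by omega : 0 < q) hnp
            rw [pow_two] at hsq
            have : q.minFac ≤ N.sqrt := Nat.le_sqrt.mpr (le_trans hsq (by omega))
            omega
          rw [if_pos ⟨hmem, by simpa using hqN, hself⟩]
          unfold pvV
          rw [if_neg (by omega), hprime.minFac_eq, Nat.div_self (by omega)]
          rfl
        · rw [if_neg (fun h => hself h.2.2)]
          have hle : q.minFac ≤ N.sqrt + 1 := by
            by_contra hgt
            exact hself ((pv_F_eq_self_iff hq2).mpr hgt)
          unfold pvF pvV
          rw [if_neg (show ¬ q < 2 by omega), if_neg (show ¬ q < 2 by omega), if_pos hle]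
      · have hnot : ¬ q ∈ List.range' 2 (N - 1) := by
          rw [List.mem_range'_1]; omega
        rw [if_neg (fun h => hnot h.1)]
        unfold pvF pvV
        rw [if_pos (show q < 2 by omega), if_pos (show q < 2 by omega)]
    · have hnot : ¬ q ∈ List.range' 2 (N - 1) := by
        rw [List.mem_range'_1]; omega
      rw [if_neg (fun h => hnot h.1), if_neg hqN, if_neg hqN]

lemma pv_sd_spec (i : Nat) : ∀ (k d : Nat), 2 ≤ d → d ≤ i.minFac → i.minFac - d ≤ k →
    pvSmallestDiv i d = if i.minFac * i.minFac ≤ i then some i.minFac else none := by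
  intro k
  induction k with
  | zero =>
    intro d h2 hle hk
    have hd : d = i.minFac := by omega
    subst hd
    have hmod : i % i.minFac = 0 := Nat.mod_eq_zero_of_dvd (Nat.minFac_dvd i)
    rw [pvSmallestDiv]
    by_cases hsq : i.minFac * i.minFac ≤ i
    · rw [dif_pos hsq, if_pos hmod, if_pos hsq]
    · rw [dif_neg hsq, if_neg hsq]
  | succ k ih =>
    intro d h2 hle hk
    rw [pvSmallestDiv]
    by_cases hsq : d * d ≤ i
    · by_cases hmod : i % d = 0
      · have hge : i.minFac ≤ d := Nat.minFac_le_of_dvd h2 (Nat.dvd_of_mod_eq_zero hmod)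
        have hd : d = i.minFac := by omega
        rw [dif_pos hsq, if_pos hmod, if_pos (by rw [← hd]; exact hsq), hd]
      · have hne : d ≠ i.minFac := by
          intro he
          apply hmod
          rw [he]
          exact Nat.mod_eq_zero_of_dvd (Nat.minFac_dvd i)
        rw [dif_pos hsq, if_neg hmod]
        exact ih (d + 1) (by omega) (by omega) (by omega)
    · have hno : ¬ i.minFac * i.minFac ≤ i := by
        intro h
        exact hsq (le_trans (Nat.mul_le_mul hle hle) h)
      rw [dif_neg hsq, if_neg hno]

lemma pv_B_eq (n : Int) :
    get_largest_proper_divisor_list_alt n = (List.range (n + 1).toNat).map pvV := by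
  unfold get_largest_proper_divisor_list_alt
  apply List.map_congr_left
  intro i _
  by_cases hi : i < 2
  · unfold pvV; rw [if_pos hi, if_pos hi]
  · have h2 : 2 ≤ i := by omega
    have htwo : 2 ≤ i.minFac := (Nat.minFac_prime (by omega : i ≠ 1)).two_le
    rw [if_neg hi, pv_sd_spec i i.minFac 2 (le_refl 2) htwo (by omega)]
    unfold pvV
    rw [if_neg hi]
    by_cases hsq : i.minFac * i.minFac ≤ i
    · rw [if_pos hsq]
    · rw [if_neg hsq]
      have hprime : Nat.Prime i := by
        by_contra hnp
        have := Nat.minFac_sq_le_self (by omega : 0 < i) hnp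
        rw [pow_two] at this
        exact hsq this
      rw [hprime.minFac_eq, Nat.div_self (by omega)]
      rfl

-- ===== VERDICT (by name: the statement is the Claim_ definition above) =====
theorem get_largest_proper_divisor_list_spec : Claim_equal_get_largest_proper_divisor_list := by
  unfold Claim_equal_get_largest_proper_divisor_list
  intro n _ hpre
  unfold Spec_get_largest_proper_divisor_list
  rcases hpre with ⟨h0, h1⟩
  by_cases hz : n = 0
  · subst hz; decide
  · have h2 : (2 : Int) ≤ n := by
      rcases lt_or_ge n 2 with h | h
      · interval_cases n <;> simp_all
      · exact h
    obtain ⟨N, rfl⟩ : ∃ N : Nat, n = (N : Int) := ⟨n.toNat, (Int.toNat_of_nonneg h0).symm⟩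
    have hN : 2 ≤ N := by exact_mod_cast h2
    rw [pv_A_eq N hN, pv_B_eq, show ((N : Int) + 1).toNat = N + 1 by omega]
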